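-- pv_equiv track=rewrite | github.com/Sarah13c/calculadoraMeNu | calciladoraMetPolinomios.py | separarTerminos
-- ===== SOURCE A (Python) =====
-- def separarTerminos(polinomio:str) -> []:
--
--     # quitar los space
--     polinomio = polinomio.replace(' ','')
--
--     terminoActual = ''
--     terminos = []
--     numeroParentesis = 0
--
--     # Por cada caracter en polinomio
--     for i in range(len(polinomio)):
--         caracterActual = polinomio[i]
--
--         # El primero caracter, siempre se agrega a terminoActual
--         if i == 0:
--             terminoActual = terminoActual + caracterActual
--
--         # El ultimo caracter
--         elif i == len(polinomio) - 1:
--             terminoActual = terminoActual + caracterActual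
--             terminos.append(terminoActual)
--
--         # Otros caracteres
--         else:
--
--             # Si se encuentra parentesis, actualizamos el valor de numeroParentesis
--             if caracterActual == '(':
--                 numeroParentesis += 1
--                 terminoActual = terminoActual + caracterActual
--             elif caracterActual == ')':
--                 numeroParentesis -= 1
--                 terminoActual = terminoActual + caracterActual
--
--             # Si se encuentra operador '+' o '-'
--             elif caracterActual == '+' or caracterActual == '-':
--
--                 # Si estamos dentro de parentesis
--                 if numeroParentesis > 0:
--                     terminoActual = terminoActual + caracterActual
--
--                 # Si estamos fuera de parentesis, crea un nuevo termino
--                 else: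
--                     terminos.append(terminoActual)
--                     terminoActual = caracterActual
--
--             # Otros caracteres
--             else:
--                 terminoActual = terminoActual + caracterActual
--
--     return terminos
-- ===== SOURCE B (Python) =====
-- def separarTerminos(polinomio: str) -> []:
--     # One depth-tracking pass records the positions of top-level '+'/'-',
--     # then the terms are built by slicing between consecutive break positions.
--     s = polinomio.replace(' ', '')
--     if not s:
--         return []
--     depth = 0
--     breaks = []
--     for i, c in enumerate(s):
--         if c == '(':
--             depth += 1
--         elif c == ')':
--             depth -= 1
--         elif (c == '+' or c == '-') and depth <= 0 and i > 0:
--             breaks.append(i)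
--     parts = []
--     start = 0
--     for b in breaks:
--         parts.append(s[start:b])
--         start = b
--     parts.append(s[start:])
--     return parts
-- ===== Notes on version B (the rewrite author's own statement) =====
-- stated objective: alternative
-- what changed: Instead of growing a current-term string character by character and flushing it at each operator, B makes one depth-tracking pass that records break indices and then builds the terms by slicing (fewer string concatenations); Pre_ excludes strings whose stripped form ends in a top-level '+'/'-', where A glues the dangling operator onto the last term while B emits it as its own term, both defensible for a malformed polynomial.
-- intended difference: A never feeds the first stripped character into its parenthesis counter: a single-character input yields [] instead of that one term, and a leading '(' or ')' makes A split at '+'/'-' signs at the wrong nesting level (e.g. '(a+b)' -> ['(a','+b)']); B tracks depth from the first character and returns the intended terms. — e.g. on separarTerminos("x"): A returns [], B returns ["x"]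
-- outside the precondition, e.g. on separarTerminos('x+'): A returns ['x+'], B returns ['x', '+']
import Mathlib
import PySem

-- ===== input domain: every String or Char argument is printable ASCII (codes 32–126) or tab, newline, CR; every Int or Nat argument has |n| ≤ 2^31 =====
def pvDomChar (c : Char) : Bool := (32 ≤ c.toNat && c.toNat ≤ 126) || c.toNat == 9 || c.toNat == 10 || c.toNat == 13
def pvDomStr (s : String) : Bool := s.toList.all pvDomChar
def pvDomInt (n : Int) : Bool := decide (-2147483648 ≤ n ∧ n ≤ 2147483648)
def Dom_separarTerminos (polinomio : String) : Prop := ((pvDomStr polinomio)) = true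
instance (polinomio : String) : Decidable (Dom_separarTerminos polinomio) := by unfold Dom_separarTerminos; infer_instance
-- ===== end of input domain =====

-- B replaces A's character-by-character term accumulator by one depth-tracking pass that
-- records break positions followed by slicing; objective: alternative decomposition, same cost.

-- ===== PORT A =====
-- A's loop body, on the space-stripped character list cs of length n;
-- state = (terminoActual, terminos, numeroParentesis);
-- cs.getD i ' ' = caracterActual = polinomio[i] (always in range: i < n)
def pvStepA (cs : List Char) (n : Nat) (st : List Char × List (List Char) × Int) (i : Nat) :
    List Char × List (List Char) × Int :=
  if i = 0 then (st.1 ++ [cs.getD i ' '], st.2.1, st.2.2)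
  else if i = n - 1 then (st.1 ++ [cs.getD i ' '], st.2.1 ++ [st.1 ++ [cs.getD i ' ']], st.2.2)
  else if cs.getD i ' ' = '(' then (st.1 ++ [cs.getD i ' '], st.2.1, st.2.2 + 1)
  else if cs.getD i ' ' = ')' then (st.1 ++ [cs.getD i ' '], st.2.1, st.2.2 - 1)
  else if cs.getD i ' ' = '+' ∨ cs.getD i ' ' = '-' then
    (if st.2.2 > 0 then (st.1 ++ [cs.getD i ' '], st.2.1, st.2.2)
     else ([cs.getD i ' '], st.2.1 ++ [st.1], st.2.2))
  else (st.1 ++ [cs.getD i ' '], st.2.1, st.2.2)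

def separarTerminos (polinomio : String) : List String :=
  let cs := (PySem.Str.replace polinomio " " "").toList   -- polinomio.replace(' ','')
  ((List.range cs.length).foldl (pvStepA cs cs.length) ([], [], 0)).2.1.map String.ofList

-- ===== PORT B =====
-- s[a:b] for 0 ≤ a, b : exact (Python clamps past-the-end and gives [] for b ≤ a, as drop/take do)
def pvSeg (cs : List Char) (a b : Nat) : List Char := (cs.drop a).take (b - a)

-- B's first loop body ('for i, c in enumerate(s)'): state = (depth, breaks);
-- cs.getD i ' ' = c = s[i] (always in range)
def pvStepBAlt (cs : List Char) (st : Int × List Nat) (i : Nat) : Int × List Nat :=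
  if cs.getD i ' ' = '(' then (st.1 + 1, st.2)
  else if cs.getD i ' ' = ')' then (st.1 - 1, st.2)
  else if (cs.getD i ' ' = '+' ∨ cs.getD i ' ' = '-') ∧ st.1 ≤ 0 ∧ 0 < i then (st.1, st.2 ++ [i])
  else (st.1, st.2)

-- B's second loop body: state = (parts, start)
def pvStepP (cs : List Char) (st : List (List Char) × Nat) (idx : Nat) :
    List (List Char) × Nat :=
  (st.1 ++ [pvSeg cs st.2 idx], idx)

def separarTerminos_alt (polinomio : String) : List String :=
  let cs := (PySem.Str.replace polinomio " " "").toList   -- polinomio.replace(' ','')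
  if cs.length = 0 then []                                -- if not s: return []
  else
    let db := (List.range cs.length).foldl (pvStepBAlt cs) (0, [])
    let ps := db.2.foldl (pvStepP cs) ([], 0)
    (ps.1 ++ [cs.drop ps.2]).map String.ofList             -- s[start:] = cs.drop start

-- ===== PRECONDITION & SPEC =====
-- helpers shared by Pre_/D_ (input-only: the parenthesis depth of the stripped string
-- before index i; used by neither port)
def pvDepth (cs : List Char) (i : Nat) : Int :=
  ((cs.take i).count '(' : Int) - (cs.take i).count ')' 

-- the space-stripped form of the input (input-shape helper for Pre_/D_ only;
-- the ports do not use it; pvStripped_eq below relates it to Python's replace(' ',''))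
def pvStripped (p : String) : List Char := p.toList.filter (· != ' ')

-- Pre_ excludes strings whose stripped form (length ≥ 2) ends in a '+'/'-' at parenthesis
-- depth ≤ 0: A glues the dangling operator onto the last term while B emits it as a term of
-- its own — both defensible for such a malformed polynomial.
def Pre_separarTerminos (polinomio : String) : Prop :=
  2 ≤ (pvStripped polinomio).length →
    ¬(((pvStripped polinomio).getD ((pvStripped polinomio).length - 1) ' ' = '+' ∨
       (pvStripped polinomio).getD ((pvStripped polinomio).length - 1) ' ' = '-') ∧
      pvDepth (pvStripped polinomio) ((pvStripped polinomio).length - 1) ≤ 0)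
instance (polinomio : String) : Decidable (Pre_separarTerminos polinomio) := by
  unfold Pre_separarTerminos; infer_instance

def pvWitness_separarTerminos : String := "x+y"

-- A never feeds the first stripped character into its parenthesis counter: a single-character
-- input yields [] instead of that one term, and a leading '(' or ')' makes A split at '+'/'-'
-- signs at the wrong nesting level; B tracks depth from the first character and returns the
-- intended terms.
def pvWrongSplit (s : List Char) : Prop :=
  s.length = 1 ∨ ∃ i ∈ List.range' 1 (s.length - 2),
    s.getD i ' ' ∈ ['+', '-'] ∧ ¬(pvDepth s i ≤ 0 ↔ pvDepth s i ≤ pvDepth s 1)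
def D_separarTerminos (polinomio : String) : Prop := pvWrongSplit (pvStripped polinomio)

-- machinery for D_'s Decidable instance: a single left-to-right pass deciding pvWrongSplit
-- in linear time (pvDepth recomputed at every index would be quadratic); used only here
def pvPen (c : Char) : Int := if c = '(' then 1 else if c = ')' then -1 else 0
def pvSum (cs : List Char) (j k : Nat) : Int :=
  ((List.range' j k).map (fun i => pvPen (cs.getD i ' '))).sum

lemma pvSum_zero (cs : List Char) (j : Nat) : pvSum cs j 0 = 0 := by simp [pvSum]

lemma pvSum_snoc (cs : List Char) (i : Nat) :
    pvSum cs 0 (i + 1) = pvSum cs 0 i + pvPen (cs.getD i ' ') := by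
  unfold pvSum
  rw [List.range'_concat]
  simp

lemma pvDepth_sum (cs : List Char) : ∀ i, pvDepth cs i = pvSum cs 0 i := by
  intro i
  induction i with
  | zero => simp [pvDepth, pvSum]
  | succ i ih =>
    rw [pvSum_snoc, ← ih]
    unfold pvDepth
    rw [List.take_add_one]
    by_cases hlt : i < cs.length
    · have hsome : cs[i]? = some cs[i] := List.getElem?_eq_getElem hlt
      have hg : cs.getD i ' ' = cs[i] := by
        simp [List.getD_eq_getElem?_getD, hsome]
      rw [hsome, hg]
      simp only [Option.toList_some, List.count_append]
      unfold pvPen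
      by_cases h1 : cs[i] = '('
      · simp [h1]
        ring
      · by_cases h2 : cs[i] = ')'
        · simp [h2]
          ring
        · simp [h1, h2]
    · have hnone : cs[i]? = none := by
        simp
        omega
      have hg : cs.getD i ' ' = ' ' := by
        simp [List.getD_eq_getElem?_getD, hnone]
      rw [hnone, hg]
      simp [pvPen]

def pvHit (s : List Char) (c : Char) (i : Nat) (d : Int) : Bool :=
  (c == '+' || c == '-') && decide (0 < i ∧ i + 1 < s.length)
    && !(decide (d ≤ 0) == decide (d ≤ pvDepth s 1))

def pvDScan (s : List Char) : Bool :=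
  (s.zipIdx.foldl (fun st ci => (st.1 + pvPen ci.1, st.2 || pvHit s ci.1 ci.2 st.1))
    ((0 : Int), false)).2

lemma pvScanGo (s : List Char) : ∀ (t : List Char) (k : Nat) (b : Bool),
    t = s.drop k →
    ((t.zipIdx k).foldl (fun st ci => (st.1 + pvPen ci.1, st.2 || pvHit s ci.1 ci.2 st.1))
        (pvSum s 0 k, b)).2
      = (b || (t.zipIdx k).any (fun ci => pvHit s ci.1 ci.2 (pvSum s 0 ci.2))) := by
  intro t
  induction t with
  | nil => intro k b _; simp
  | cons c t ih =>
    intro k b ht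
    have hk : s[k]? = some c := by
      have h0 : (s.drop k)[0]? = some c := by rw [← ht]; rfl
      rw [List.getElem?_drop] at h0
      simpa using h0
    have hkd : s.getD k ' ' = c := by
      simp [List.getD_eq_getElem?_getD, hk]
    have ht' : t = s.drop (k + 1) := by
      have h1 := congrArg List.tail ht
      simpa [List.tail_drop] using h1
    have hnext : pvSum s 0 k + pvPen c = pvSum s 0 (k + 1) := by
      rw [pvSum_snoc, hkd]
    rw [List.zipIdx_cons]
    simp only [List.foldl_cons, List.any_cons]
    rw [hnext, ih (k + 1) _ ht']
    rw [Bool.or_assoc]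

lemma pvDScan_any (s : List Char) :
    pvDScan s = s.zipIdx.any (fun ci => pvHit s ci.1 ci.2 (pvSum s 0 ci.2)) := by
  unfold pvDScan
  have h := pvScanGo s s 0 false (by simp)
  rw [pvSum_zero] at h
  simpa using h

lemma pvDFast_iff (s : List Char) :
    (s.length = 1 ∨ pvDScan s = true) ↔ pvWrongSplit s := by
  unfold pvWrongSplit
  apply or_congr Iff.rfl
  rw [pvDScan_any, List.any_eq_true]
  constructor
  · rintro ⟨⟨c, i⟩, hmem, hhit⟩
    have hget := List.mk_mem_zipIdx_iff_getElem?.mp hmem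
    unfold pvHit at hhit
    simp only [Bool.and_eq_true, Bool.or_eq_true, beq_iff_eq, decide_eq_true_eq,
      Bool.not_eq_eq_eq_not, Bool.not_true, beq_eq_false_iff_ne, ne_eq, decide_eq_decide] at hhit
    obtain ⟨⟨hop, hbound⟩, hne⟩ := hhit
    have hgd : s.getD i ' ' = c := by
      simp [List.getD_eq_getElem?_getD, hget]
    refine ⟨i, ?_, ?_, ?_⟩
    · rw [List.mem_range'_1]
      omega
    · rw [hgd]
      rcases hop with h | h <;> rw [h] <;> simp
    · rw [pvDepth_sum]
      exact hne
  · rintro ⟨i, hi, hop, hne⟩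
    have hi' := List.mem_range'_1.mp hi
    have hlt : i < s.length := by omega
    refine ⟨(s.getD i ' ', i), ?_, ?_⟩
    · rw [List.mk_mem_zipIdx_iff_getElem?]
      simp [List.getD_eq_getElem?_getD, List.getElem?_eq_getElem hlt]
    · unfold pvHit
      simp only [Bool.and_eq_true, Bool.or_eq_true, beq_iff_eq, decide_eq_true_eq,
        Bool.not_eq_eq_eq_not, Bool.not_true, beq_eq_false_iff_ne, ne_eq, decide_eq_decide]
      rw [pvDepth_sum] at hne
      refine ⟨⟨?_, by omega⟩, hne⟩
      simpa using hop

instance (polinomio : String) : Decidable (D_separarTerminos polinomio) :=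
  decidable_of_iff _ (pvDFast_iff (pvStripped polinomio))

def Spec_separarTerminos (polinomio : String) (out : List String) : Prop :=
  ¬ D_separarTerminos polinomio → out = separarTerminos_alt polinomio
instance (polinomio : String) (out : List String) : Decidable (Spec_separarTerminos polinomio out) := by
  unfold Spec_separarTerminos; infer_instance

def pvDiffWitness_separarTerminos : String := "x"
def pvDiffWitnessOut_separarTerminos : (List String) × (List String) := ([], ["x"])

-- ===== CLAIM (what is proved, stated in full; the proofs are below) =====
def Claim_unchanged_separarTerminos : Prop := ∀ (polinomio : String), Dom_separarTerminos polinomio → Pre_separarTerminos polinomio → Spec_separarTerminos polinomio (separarTerminos polinomio)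
def Claim_changed_separarTerminos : Prop := Dom_separarTerminos (pvDiffWitness_separarTerminos) ∧ Pre_separarTerminos (pvDiffWitness_separarTerminos) ∧ D_separarTerminos (pvDiffWitness_separarTerminos) ∧ separarTerminos (pvDiffWitness_separarTerminos) = pvDiffWitnessOut_separarTerminos.1 ∧ separarTerminos_alt (pvDiffWitness_separarTerminos) = pvDiffWitnessOut_separarTerminos.2 ∧ pvDiffWitnessOut_separarTerminos.1 ≠ pvDiffWitnessOut_separarTerminos.2

-- ===== LEMMAS AND PROOFS =====

lemma pvStripGo : ∀ (fuel : Nat) (l acc : List Char), l.length ≤ fuel →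
    PySem.Chars.replace.go [' '] [] fuel l acc
      = acc.reverse ++ l.filter (· != ' ') := by
  intro fuel
  induction fuel with
  | zero =>
    intro l acc h
    have : l = [] := List.eq_nil_of_length_eq_zero (by omega)
    subst this
    simp [PySem.Chars.replace.go]
  | succ n ih =>
    intro l acc h
    cases l with
    | nil => simp [PySem.Chars.replace.go]
    | cons c t =>
      by_cases hc : c = ' '
      · subst hc
        have hpre : [' '].isPrefixOf (' ' :: t) = true := by simp [List.isPrefixOf]
        rw [PySem.Chars.replace.go]
        simp only [hpre, if_true, List.reverse_nil, List.nil_append]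
        rw [show List.drop [' '].length (' ' :: t) = t from rfl,
            ih t acc (by simpa using h)]
        simp
      · have hpre : [' '].isPrefixOf (c :: t) = false := by
          simp [List.isPrefixOf]
          intro h'; exact absurd h'.symm hc
        rw [PySem.Chars.replace.go]
        simp only [hpre, Bool.false_eq_true, if_false]
        rw [ih t (c :: acc) (by simpa using h)]
        simp [hc]

lemma pvStripped_eq (p : String) :
    (PySem.Str.replace p " " "").toList = pvStripped p := by
  rw [PySem.Str.toList_replace]
  show PySem.Chars.replace p.toList [' '] [] = _
  rw [PySem.Chars.replace]
  rw [if_neg (by simp)]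
  rw [pvStripGo p.toList.length p.toList [] le_rfl]
  simp [pvStripped]

-- proof-side description of A's break decisions on the middle indices:
-- same as pvStepBAlt but without the 0 < i test (A's middle loop never sees index 0)
def pvStepB (cs : List Char) (st : Int × List Nat) (i : Nat) : Int × List Nat :=
  if cs.getD i ' ' = '(' then (st.1 + 1, st.2)
  else if cs.getD i ' ' = ')' then (st.1 - 1, st.2)
  else if (cs.getD i ' ' = '+' ∨ cs.getD i ' ' = '-') ∧ st.1 ≤ 0 then (st.1, st.2 ++ [i])
  else (st.1, st.2)

-- A's loop body on the middle indices (0 < i < n-1): the first two branches cannot fire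
def pvStepM (cs : List Char) (st : List Char × List (List Char) × Int) (i : Nat) :
    List Char × List (List Char) × Int :=
  if cs.getD i ' ' = '(' then (st.1 ++ [cs.getD i ' '], st.2.1, st.2.2 + 1)
  else if cs.getD i ' ' = ')' then (st.1 ++ [cs.getD i ' '], st.2.1, st.2.2 - 1)
  else if cs.getD i ' ' = '+' ∨ cs.getD i ' ' = '-' then
    (if st.2.2 > 0 then (st.1 ++ [cs.getD i ' '], st.2.1, st.2.2)
     else ([cs.getD i ' '], st.2.1 ++ [st.1], st.2.2))
  else (st.1 ++ [cs.getD i ' '], st.2.1, st.2.2)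

def pvLastOf (start : Nat) (bs : List Nat) : Nat := bs.getLastD start

-- the pieces of cs between consecutive break positions (the final, open-ended piece excluded)
def pvSegs (cs : List Char) (start : Nat) : List Nat → List (List Char)
  | [] => []
  | b :: bs => pvSeg cs start b :: pvSegs cs b bs

lemma pvLastOf_cons (start b : Nat) (bs : List Nat) :
    pvLastOf start (b :: bs) = pvLastOf b bs := by
  unfold pvLastOf
  rw [List.getLastD_cons]

lemma pvSeg_snoc (cs : List Char) (a b : Nat) (hab : a ≤ b) (hb : b < cs.length) :
    pvSeg cs a b ++ [cs.getD b ' '] = pvSeg cs a (b + 1) := by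
  unfold pvSeg
  have h1 : b + 1 - a = (b - a) + 1 := by omega
  have h2 : (cs.drop a)[b - a]? = some cs[b] := by
    rw [List.getElem?_drop, show a + (b - a) = b by omega, List.getElem?_eq_getElem hb]
  rw [h1, List.take_add_one, h2]
  simp [List.getD_eq_getElem?_getD, List.getElem?_eq_getElem hb]

lemma pvStepB_prepend (cs : List Char) :
    ∀ (l : List Nat) (d : Int) (bs0 : List Nat),
      l.foldl (pvStepB cs) (d, bs0)
        = ((l.foldl (pvStepB cs) (d, [])).1, bs0 ++ (l.foldl (pvStepB cs) (d, [])).2) := by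
  intro l
  induction l with
  | nil => intro d bs0; simp
  | cons i l ih =>
    intro d bs0
    have hstep : ∀ bs1, pvStepB cs (d, bs1) i
        = ((pvStepB cs (d, ([] : List Nat)) i).1, bs1 ++ (pvStepB cs (d, ([] : List Nat)) i).2) := by
      intro bs1; unfold pvStepB; split_ifs <;> simp
    simp only [List.foldl_cons]
    rw [hstep bs0, ih _ (bs0 ++ _),
        show pvStepB cs (d, ([] : List Nat)) i
           = ((pvStepB cs (d, ([] : List Nat)) i).1, (pvStepB cs (d, ([] : List Nat)) i).2) from rfl,
        ih _ (pvStepB cs (d, ([] : List Nat)) i).2]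
    simp

lemma pvMid (cs : List Char) :
    ∀ (m j last : Nat) (ts : List (List Char)) (d : Int),
      last ≤ j → j + m ≤ cs.length →
      (List.range' j m).foldl (pvStepM cs) (pvSeg cs last j, ts, d)
        = (pvSeg cs (pvLastOf last ((List.range' j m).foldl (pvStepB cs) (d, [])).2) (j + m),
           ts ++ pvSegs cs last ((List.range' j m).foldl (pvStepB cs) (d, [])).2,
           ((List.range' j m).foldl (pvStepB cs) (d, [])).1)
      ∧ pvLastOf last ((List.range' j m).foldl (pvStepB cs) (d, [])).2 ≤ j + m := by
  intro m
  induction m with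
  | zero =>
    intro j last ts d hl hjm
    constructor
    · simp [pvLastOf, pvSegs]
    · simp [pvLastOf]; omega
  | succ m ih =>
    intro j last ts d hl hjm
    have hjlt : j < cs.length := by omega
    have hj1 : j + (m + 1) = (j + 1) + m := by omega
    rw [hj1, List.range'_succ]
    simp only [List.foldl_cons]
    by_cases h1 : cs.getD j ' ' = '('
    · have hA : pvStepM cs (pvSeg cs last j, ts, d) j = (pvSeg cs last (j + 1), ts, d + 1) := by
        unfold pvStepM
        rw [if_pos h1, pvSeg_snoc cs last j hl hjlt]
      have hB : pvStepB cs (d, ([] : List Nat)) j = (d + 1, []) := by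
        unfold pvStepB; rw [if_pos h1]
      rw [hA, hB]
      exact ih (j + 1) last ts (d + 1) (by omega) (by omega)
    · by_cases h2 : cs.getD j ' ' = ')'
      · have hA : pvStepM cs (pvSeg cs last j, ts, d) j = (pvSeg cs last (j + 1), ts, d - 1) := by
          unfold pvStepM
          rw [if_neg h1, if_pos h2, pvSeg_snoc cs last j hl hjlt]
        have hB : pvStepB cs (d, ([] : List Nat)) j = (d - 1, []) := by
          unfold pvStepB; rw [if_neg h1, if_pos h2]
        rw [hA, hB]
        exact ih (j + 1) last ts (d - 1) (by omega) (by omega)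
      · by_cases h3 : cs.getD j ' ' = '+' ∨ cs.getD j ' ' = '-'
        · by_cases h4 : d > 0
          · have hA : pvStepM cs (pvSeg cs last j, ts, d) j = (pvSeg cs last (j + 1), ts, d) := by
              unfold pvStepM
              rw [if_neg h1, if_neg h2, if_pos h3, if_pos h4, pvSeg_snoc cs last j hl hjlt]
            have hB : pvStepB cs (d, ([] : List Nat)) j = (d, []) := by
              unfold pvStepB
              rw [if_neg h1, if_neg h2, if_neg (show ¬ ((cs.getD j ' ' = '+' ∨ cs.getD j ' ' = '-') ∧ d ≤ 0) from by
                intro h; omega)]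
            rw [hA, hB]
            exact ih (j + 1) last ts d (by omega) (by omega)
          · have hc1 : pvSeg cs j (j + 1) = [cs.getD j ' '] := by
              have := pvSeg_snoc cs j j le_rfl hjlt
              simpa [pvSeg] using this.symm
            have hA : pvStepM cs (pvSeg cs last j, ts, d) j
                = (pvSeg cs j (j + 1), ts ++ [pvSeg cs last j], d) := by
              unfold pvStepM
              rw [if_neg h1, if_neg h2, if_pos h3, if_neg h4, hc1]
            have hB : pvStepB cs (d, ([] : List Nat)) j = (d, [j]) := by
              unfold pvStepB
              rw [if_neg h1, if_neg h2, if_pos (show (cs.getD j ' ' = '+' ∨ cs.getD j ' ' = '-') ∧ d ≤ 0 from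
                ⟨h3, by omega⟩)]
              simp
            rw [hA, hB, pvStepB_prepend cs (List.range' (j + 1) m) d [j]]
            obtain ⟨he, hle⟩ := ih (j + 1) j (ts ++ [pvSeg cs last j]) d (by omega) (by omega)
            refine ⟨?_, by rw [List.singleton_append, pvLastOf_cons]; exact hle⟩
            rw [he, List.singleton_append, pvLastOf_cons]
            simp [pvSegs]
        · have hA : pvStepM cs (pvSeg cs last j, ts, d) j = (pvSeg cs last (j + 1), ts, d) := by
            unfold pvStepM
            rw [if_neg h1, if_neg h2, if_neg h3, pvSeg_snoc cs last j hl hjlt]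
          have hB : pvStepB cs (d, ([] : List Nat)) j = (d, []) := by
            unfold pvStepB
            rw [if_neg h1, if_neg h2, if_neg (show ¬ ((cs.getD j ' ' = '+' ∨ cs.getD j ' ' = '-') ∧ d ≤ 0) from by
              intro h; exact h3 h.1)]
          rw [hA, hB]
          exact ih (j + 1) last ts d (by omega) (by omega)

lemma pvParts (cs : List Char) :
    ∀ (bs : List Nat) (parts : List (List Char)) (start : Nat),
      bs.foldl (pvStepP cs) (parts, start) = (parts ++ pvSegs cs start bs, pvLastOf start bs) := by
  intro bs
  induction bs with
  | nil => intro parts start; simp [pvSegs, pvLastOf]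
  | cons b bs ih =>
    intro parts start
    simp only [List.foldl_cons, pvStepP]
    rw [ih, pvLastOf_cons]
    simp [pvSegs]

-- A's result, written as the break-list/slicing expression over pvStepB from depth 0
lemma pvMain (cs : List Char) :
    ((List.range cs.length).foldl (pvStepA cs cs.length) ([], [], 0)).2.1
      = (if cs.length < 2 then []
         else
           (((List.range' 1 (cs.length - 2)).foldl (pvStepB cs) (0, [])).2.foldl
               (pvStepP cs) ([], 0)).1
             ++ [cs.drop (((List.range' 1 (cs.length - 2)).foldl (pvStepB cs) (0, [])).2.foldl
                   (pvStepP cs) ([], 0)).2]) := by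
  by_cases h2 : cs.length < 2
  · rw [if_pos h2]
    match cs, h2 with
    | [], _ => simp
    | [c], _ => simp [pvStepA, List.range_succ]
  · rw [if_neg h2]
    obtain ⟨m, hm⟩ : ∃ m, cs.length = m + 2 := ⟨cs.length - 2, by omega⟩
    rw [hm, show m + 2 - 2 = m from by omega]
    have hrange : List.range (m + 2) = 0 :: (List.range' 1 m ++ [m + 1]) := by
      rw [List.range_eq_range', show m + 2 = (m + 1) + 1 from rfl, List.range'_succ,
          List.range'_concat, Nat.one_mul, Nat.add_comm 1 m]
    rw [hrange]
    simp only [List.foldl_cons, List.foldl_append]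
    have hseg01 : pvSeg cs 0 1 = [cs.getD 0 ' '] := by
      have := pvSeg_snoc cs 0 0 le_rfl (by omega)
      simpa [pvSeg] using this.symm
    have h0 : pvStepA cs (m + 2) ([], [], 0) 0 = (pvSeg cs 0 1, [], 0) := by
      unfold pvStepA
      rw [if_pos rfl, hseg01]
      simp
    rw [h0]
    have hmid : (List.range' 1 m).foldl (pvStepA cs (m + 2)) (pvSeg cs 0 1, [], 0)
        = (List.range' 1 m).foldl (pvStepM cs) (pvSeg cs 0 1, [], 0) := by
      apply PySem.List.foldl_congr_mem
      intro acc i hi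
      have hi' := List.mem_range'_1.mp hi
      unfold pvStepA pvStepM
      rw [if_neg (show ¬ i = 0 from by omega), if_neg (show ¬ i = m + 2 - 1 from by omega)]
    rw [hmid]
    obtain ⟨he, hle⟩ := pvMid cs m 1 0 [] 0 (by omega) (by omega)
    rw [he]
    have hfin : pvStepA cs (m + 2)
          (pvSeg cs (pvLastOf 0 ((List.range' 1 m).foldl (pvStepB cs) (0, [])).2) (1 + m),
           [] ++ pvSegs cs 0 ((List.range' 1 m).foldl (pvStepB cs) (0, [])).2,
           ((List.range' 1 m).foldl (pvStepB cs) (0, [])).1) (m + 1)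
        = (pvSeg cs (pvLastOf 0 ((List.range' 1 m).foldl (pvStepB cs) (0, [])).2) (1 + m)
             ++ [cs.getD (m + 1) ' '],
           ([] ++ pvSegs cs 0 ((List.range' 1 m).foldl (pvStepB cs) (0, [])).2)
             ++ [pvSeg cs (pvLastOf 0 ((List.range' 1 m).foldl (pvStepB cs) (0, [])).2) (1 + m)
                   ++ [cs.getD (m + 1) ' ']],
           ((List.range' 1 m).foldl (pvStepB cs) (0, [])).1) := by
      unfold pvStepA
      rw [if_neg (show ¬ m + 1 = 0 from by omega), if_pos (show m + 1 = m + 2 - 1 from by omega)]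
    rw [hfin]
    have hdrop : pvSeg cs (pvLastOf 0 ((List.range' 1 m).foldl (pvStepB cs) (0, [])).2) (1 + m)
          ++ [cs.getD (m + 1) ' ']
        = cs.drop (pvLastOf 0 ((List.range' 1 m).foldl (pvStepB cs) (0, [])).2) := by
      rw [show m + 1 = 1 + m from by omega,
          pvSeg_snoc cs _ (1 + m) (by omega) (by omega)]
      unfold pvSeg
      rw [List.take_of_length_le]
      rw [List.length_drop, hm]
      omega
    rw [pvParts cs ((List.range' 1 m).foldl (pvStepB cs) (0, [])).2 [] 0]
    dsimp only
    rw [hdrop]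
    simp

-- the break predicate realised by pvStepB started at depth d0 from index j
def pvPred (cs : List Char) (d0 : Int) (j : Nat) (i : Nat) : Bool :=
  (cs.getD i ' ' == '+' || cs.getD i ' ' == '-') && decide (d0 + pvSum cs j (i - j) ≤ 0)

lemma pvSum_cons (cs : List Char) (j m : Nat) :
    pvSum cs j (m + 1) = pvPen (cs.getD j ' ') + pvSum cs (j + 1) m := by
  simp [pvSum, List.range'_succ]

lemma pvSum_head (cs : List Char) (j i : Nat) (h : j < i) :
    pvSum cs j (i - j) = pvPen (cs.getD j ' ') + pvSum cs (j + 1) (i - (j + 1)) := by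
  rw [show i - j = (i - (j + 1)) + 1 from by omega, pvSum_cons]

lemma pvPred_shift (cs : List Char) (d0 : Int) (j i : Nat) (h : j < i) :
    pvPred cs (d0 + pvPen (cs.getD j ' ')) (j + 1) i = pvPred cs d0 j i := by
  unfold pvPred
  have he : d0 + pvPen (cs.getD j ' ') + pvSum cs (j + 1) (i - (j + 1))
      = d0 + pvSum cs j (i - j) := by
    rw [pvSum_head cs j i h]; ring
  rw [he]

lemma pvStepB_char (cs : List Char) (d0 : Int) (j : Nat) :
    pvStepB cs (d0, []) j
      = (d0 + pvPen (cs.getD j ' '), if pvPred cs d0 j j then [j] else []) := by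
  unfold pvStepB pvPred pvPen
  rw [Nat.sub_self, pvSum_zero, add_zero]
  generalize cs.getD j ' ' = c
  by_cases h1 : c = '('
  · subst h1; simp
  · by_cases h2 : c = ')'
    · subst h2; simp [sub_eq_add_neg]
    · by_cases h3 : c = '+' ∨ c = '-'
      · have hb : (c == '+' || c == '-') = true := by
          rcases h3 with h | h <;> simp [h]
        by_cases h4 : d0 ≤ 0
        · rw [if_neg h1, if_neg h2, if_pos ⟨h3, h4⟩, if_neg h1, if_neg h2, hb]
          simp [h4]
        · rw [if_neg h1, if_neg h2, if_neg (fun h => h4 h.2), if_neg h1, if_neg h2, hb]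
          simp [h4]
      · have hb : (c == '+' || c == '-') = false := by
          rw [not_or] at h3
          simp [h3.1, h3.2]
        rw [if_neg h1, if_neg h2, if_neg (fun h => h3 h.1), if_neg h1, if_neg h2, hb]
        simp

-- the breaks produced by pvStepB over range' j m from depth d0, as a filter
lemma pvBreaksChar (cs : List Char) :
    ∀ (m j : Nat) (d0 : Int),
      (List.range' j m).foldl (pvStepB cs) (d0, [])
        = (d0 + pvSum cs j m, (List.range' j m).filter (pvPred cs d0 j)) := by
  intro m
  induction m with
  | zero => intro j d0; simp [pvSum]
  | succ m ih =>
    intro j d0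
    rw [List.range'_succ]
    simp only [List.foldl_cons, List.filter_cons]
    rw [pvStepB_char]
    have hsum : d0 + pvSum cs j (m + 1)
        = (d0 + pvPen (cs.getD j ' ')) + pvSum cs (j + 1) m := by
      rw [pvSum_cons]; ring
    have hfc : (List.range' (j + 1) m).filter (pvPred cs (d0 + pvPen (cs.getD j ' ')) (j + 1))
        = (List.range' (j + 1) m).filter (pvPred cs d0 j) := by
      apply List.filter_congr
      intro i hi
      exact pvPred_shift cs d0 j i (by have := List.mem_range'_1.mp hi; omega)
    by_cases hp : pvPred cs d0 j j
    · rw [if_pos hp, if_pos hp,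
          pvStepB_prepend cs (List.range' (j + 1) m) (d0 + pvPen (cs.getD j ' ')) [j],
          ih (j + 1) (d0 + pvPen (cs.getD j ' '))]
      simp only [List.singleton_append]
      rw [hsum, hfc]
    · rw [if_neg hp, if_neg hp, ih (j + 1) (d0 + pvPen (cs.getD j ' ')), hsum, hfc]

-- B's break list: index 0 contributes only its parenthesis weight, the middle indices
-- behave like pvStepB, and (under Pre_) the last index appends nothing
lemma pvStepBAlt_zero (cs : List Char) :
    pvStepBAlt cs (0, []) 0 = (pvPen (cs.getD 0 ' '), []) := by
  unfold pvStepBAlt pvPen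
  split_ifs with h1 h2 h3 <;> simp_all

lemma pvAltBreaks (cs : List Char) (m : Nat) (hm : cs.length = m + 2)
    (hpre : ¬((cs.getD (m + 1) ' ' = '+' ∨ cs.getD (m + 1) ' ' = '-') ∧
        pvSum cs 0 (m + 1) ≤ 0)) :
    ((List.range cs.length).foldl (pvStepBAlt cs) (0, [])).2
      = ((List.range' 1 m).foldl (pvStepB cs) (pvPen (cs.getD 0 ' '), [])).2 := by
  have hrange : List.range (m + 2) = 0 :: (List.range' 1 m ++ [m + 1]) := by
    rw [List.range_eq_range', show m + 2 = (m + 1) + 1 from rfl, List.range'_succ,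
        List.range'_concat, Nat.one_mul, Nat.add_comm 1 m]
  rw [hm, hrange]
  simp only [List.foldl_cons, List.foldl_append]
  rw [pvStepBAlt_zero]
  have hmid : (List.range' 1 m).foldl (pvStepBAlt cs) (pvPen (cs.getD 0 ' '), [])
      = (List.range' 1 m).foldl (pvStepB cs) (pvPen (cs.getD 0 ' '), []) := by
    apply PySem.List.foldl_congr_mem
    intro acc i hi
    have hi' := List.mem_range'_1.mp hi
    unfold pvStepBAlt pvStepB
    by_cases h1 : cs.getD i ' ' = '('
    · rw [if_pos h1, if_pos h1]
    · by_cases h2 : cs.getD i ' ' = ')'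
      · rw [if_neg h1, if_neg h1, if_pos h2, if_pos h2]
      · by_cases h3 : (cs.getD i ' ' = '+' ∨ cs.getD i ' ' = '-') ∧ acc.1 ≤ 0
        · rw [if_neg h1, if_neg h1, if_neg h2, if_neg h2,
              if_pos ⟨h3.1, h3.2, by omega⟩, if_pos h3]
        · rw [if_neg h1, if_neg h1, if_neg h2, if_neg h2,
              if_neg (by intro h; exact h3 ⟨h.1, h.2.1⟩), if_neg h3]
  rw [hmid, pvBreaksChar cs m 1 (pvPen (cs.getD 0 ' '))]
  have hd : pvPen (cs.getD 0 ' ') + pvSum cs 1 m = pvSum cs 0 (m + 1) := by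
    rw [pvSum_cons cs 0 m]
  unfold pvStepBAlt
  split_ifs with h1 h2 h3
  · rfl
  · rfl
  · exact absurd ⟨h3.1, by rw [hd] at h3; exact h3.2.1⟩ hpre
  · rfl

-- under ¬D_, the middle break predicates from depth pvPen(cs[0]) and from depth 0 agree
lemma pvFiltersEq (cs : List Char) (m : Nat)
    (hnd : ∀ i ∈ List.range' 1 m, (cs.getD i ' ' = '+' ∨ cs.getD i ' ' = '-') →
      ((pvSum cs 0 i ≤ 0) ↔ (pvSum cs 0 i ≤ pvSum cs 0 1))) :
    (List.range' 1 m).filter (pvPred cs (pvPen (cs.getD 0 ' ')) 1)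
      = (List.range' 1 m).filter (pvPred cs 0 1) := by
  apply List.filter_congr
  intro i hi
  have hi' := List.mem_range'_1.mp hi
  unfold pvPred
  by_cases hop : (cs.getD i ' ' == '+' || cs.getD i ' ' == '-') = true
  · have hopP : cs.getD i ' ' = '+' ∨ cs.getD i ' ' = '-' := by
      simpa using hop
    have hiff := hnd i hi hopP
    have hsum : pvSum cs 0 i = pvPen (cs.getD 0 ' ') + pvSum cs 1 (i - 1) := by
      have h := pvSum_head cs 0 i (by omega)
      simpa using h
    have hone : pvSum cs 0 1 = pvPen (cs.getD 0 ' ') := by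
      have h := pvSum_snoc cs 0
      simpa [pvSum_zero] using h
    rw [hop]
    simp only [Bool.true_and, decide_eq_decide]
    rw [hsum, hone] at hiff
    omega
  · simp only [Bool.not_eq_true] at hop
    rw [hop]
    simp

-- ===== VERDICT (by name: the statement is the Claim_ definition above) =====
theorem separarTerminos_spec : Claim_unchanged_separarTerminos := by
  intro p _ hpre hnd
  unfold separarTerminos separarTerminos_alt
  unfold Pre_separarTerminos at hpre
  unfold D_separarTerminos pvWrongSplit at hnd
  rw [← pvStripped_eq p] at hpre hnd
  set cs := (PySem.Str.replace p " " "").toList with hcs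
  simp only [pvMain cs]
  by_cases h0 : cs.length = 0
  · rw [if_pos (show cs.length < 2 from by omega), if_pos h0]
    rfl
  · by_cases h1 : cs.length = 1
    · exact absurd (Or.inl h1) hnd
    · have hn2 : 2 ≤ cs.length := by omega
      obtain ⟨m, hm⟩ : ∃ m, cs.length = m + 2 := ⟨cs.length - 2, by omega⟩
      have hpre' : ¬((cs.getD (m + 1) ' ' = '+' ∨ cs.getD (m + 1) ' ' = '-') ∧
          pvSum cs 0 (m + 1) ≤ 0) := by
        have h := hpre hn2
        rw [pvDepth_sum, hm, show m + 2 - 1 = m + 1 from by omega] at h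
        exact h
      have hnd' : ∀ i ∈ List.range' 1 m, (cs.getD i ' ' = '+' ∨ cs.getD i ' ' = '-') →
          ((pvSum cs 0 i ≤ 0) ↔ (pvSum cs 0 i ≤ pvSum cs 0 1)) := by
        intro i hi hop
        by_contra hne
        apply hnd
        refine Or.inr ⟨i, ?_, ?_, ?_⟩
        · rw [hm, show m + 2 - 2 = m from by omega]
          exact hi
        · rcases hop with h | h <;> rw [h] <;> simp
        · rw [pvDepth_sum, pvDepth_sum]
          exact hne
      have hbreaks : ((List.range cs.length).foldl (pvStepBAlt cs) (0, [])).2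
          = ((List.range' 1 (cs.length - 2)).foldl (pvStepB cs) (0, [])).2 := by
        rw [pvAltBreaks cs m hm hpre', hm, show m + 2 - 2 = m from by omega,
            pvBreaksChar cs m 1 (pvPen (cs.getD 0 ' ')), pvBreaksChar cs m 1 0,
            pvFiltersEq cs m hnd']
      rw [if_neg (show ¬ cs.length < 2 from by omega), if_neg h0, hbreaks]

theorem separarTerminos_changed : Claim_changed_separarTerminos := by
  unfold Claim_changed_separarTerminos; decide
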